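-- pv_equiv track=rewrite | github.com/devshid/tic-tac-toe-python | gui_add.py | col_match
-- ===== SOURCE A (Python) =====
-- def col_match(moves):
--     col = {}
--     for move in moves:
--         if str(move[1]) in col.keys():
--             col[str(move[1])] += 1
--         else:
--             col[str(move[1])] = 1
--     for r in col.values():
--         if r >= 3:
--             return True
--     return False
-- ===== SOURCE B (Python) =====
-- def col_match(moves):
--     keys = sorted(str(m[1]) for m in moves)
--     prev = None
--     run = 0
--     for k in keys:
--         run = run + 1 if k == prev else 1
--         if run >= 3:
--             return True
--         prev = k
--     return False
-- ===== Notes on version B (the rewrite author's own statement) =====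
-- stated objective: alternative
-- what changed: Replaces the dict-based frequency count plus a scan of the values with sort-then-scan: sort the stringified column keys and detect a run of 3 equal adjacent keys with a run-length counter.
import Mathlib
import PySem

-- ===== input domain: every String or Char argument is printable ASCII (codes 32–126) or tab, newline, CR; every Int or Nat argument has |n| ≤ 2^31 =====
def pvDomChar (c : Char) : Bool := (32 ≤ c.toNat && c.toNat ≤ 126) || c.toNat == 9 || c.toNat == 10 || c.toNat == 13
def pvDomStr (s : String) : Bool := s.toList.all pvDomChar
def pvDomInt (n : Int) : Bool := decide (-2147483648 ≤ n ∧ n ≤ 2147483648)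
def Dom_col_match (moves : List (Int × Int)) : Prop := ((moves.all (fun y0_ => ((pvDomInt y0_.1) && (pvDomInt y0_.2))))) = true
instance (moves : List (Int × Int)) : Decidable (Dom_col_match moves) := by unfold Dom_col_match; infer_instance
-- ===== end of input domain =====

-- B replaces A's dict frequency count with sort-then-scan over the stringified keys (alternative algorithm; return value only).

-- ===== PORT A =====
def col_match (moves : List (Int × Int)) : Bool :=
  let col := moves.foldl (fun col move =>
      if col.contains (PySem.Int.toStr move.2) then
        col.modify (PySem.Int.toStr move.2) 0 (· + 1)
      else
        col.insert (PySem.Int.toStr move.2) 1)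
    (PySem.Dict.empty : PySem.Dict String Int)
  -- 'for r in col.values(): if r >= 3: return True / return False'
  col.values.any (fun r => decide (3 ≤ r))

-- ===== PORT B =====
-- the run-length scan loop of Source B: prev key, current run length, remaining keys
def runScan : Option String → Int → List String → Bool
  | _, _, [] => false
  | prev, run, k :: rest =>
    let run' := if some k = prev then run + 1 else 1
    if 3 ≤ run' then true else runScan (some k) run' rest

def col_match_alt (moves : List (Int × Int)) : Bool :=
  runScan none 0 (PySem.List.sorted (moves.map (fun m => PySem.Int.toStr m.2)) (fun k => k))

-- ===== PRECONDITION & SPEC =====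
def Spec_col_match (moves : List (Int × Int)) (out : Bool) : Prop := out = col_match_alt moves
instance (moves : List (Int × Int)) (out : Bool) : Decidable (Spec_col_match moves out) := by unfold Spec_col_match; infer_instance

-- ===== CLAIM (what is proved, stated in full; the proofs are below) =====
def Claim_equal_col_match : Prop := ∀ (moves : List (Int × Int)), Dom_col_match moves → Spec_col_match moves (col_match moves)

-- ===== LEMMAS AND PROOFS =====

theorem pv_modify_eq_insert_of_not_contains (d : PySem.Dict String Int) (k : String)
    (h : d.contains k = false) : d.modify k 0 (· + 1) = d.insert k 1 := by
  have h0 : d.getD k 0 = 0 := PySem.Dict.getD_of_not_contains d 0 h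
  simp [PySem.Dict.modify, PySem.Dict.insert, h0]

theorem pv_colA_eq_counter (moves : List (Int × Int)) :
    moves.foldl (fun col move =>
      if col.contains (PySem.Int.toStr move.2) then
        col.modify (PySem.Int.toStr move.2) 0 (· + 1)
      else
        col.insert (PySem.Int.toStr move.2) 1) (PySem.Dict.empty : PySem.Dict String Int)
    = PySem.Dict.counter (moves.map (fun m => PySem.Int.toStr m.2)) := by
  rw [PySem.Dict.counter_eq_foldl, List.foldl_map]
  apply PySem.List.foldl_congr_mem
  intro d m _
  by_cases h : d.contains (PySem.Int.toStr m.2)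
  · simp [h]
  · simp only [Bool.not_eq_true] at h
    simp [h, pv_modify_eq_insert_of_not_contains d _ h]

theorem pv_A_iff (moves : List (Int × Int)) :
    col_match moves = true ↔
      ∃ k ∈ moves.map (fun m => PySem.Int.toStr m.2),
        3 ≤ (moves.map (fun m => PySem.Int.toStr m.2)).count k := by
  rw [show col_match moves
      = ((moves.foldl (fun col move =>
          if col.contains (PySem.Int.toStr move.2) then
            col.modify (PySem.Int.toStr move.2) 0 (· + 1)
          else
            col.insert (PySem.Int.toStr move.2) 1) (PySem.Dict.empty : PySem.Dict String Int)).values.any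
          (fun r => decide (3 ≤ r))) from rfl]
  rw [pv_colA_eq_counter]
  set ks := moves.map (fun m => PySem.Int.toStr m.2) with hks
  have hv : (PySem.Dict.counter ks).values
      = (PySem.Set.ofList ks).map (fun k => ((ks.count k : Int))) := by
    show ((PySem.Dict.counter ks).items).map Prod.snd = _
    rw [PySem.Dict.items_counter]
    simp
  rw [hv]
  simp only [List.any_eq_true, List.mem_map]
  constructor
  · rintro ⟨r, ⟨k, hk, rfl⟩, hr⟩
    exact ⟨k, (PySem.Set.mem_ofList ks k).mp hk, by simpa using hr⟩
  · rintro ⟨k, hk, h3⟩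
    exact ⟨(ks.count k : Int), ⟨k, (PySem.Set.mem_ofList ks k).mpr hk, rfl⟩,
      by simpa using h3⟩

theorem pv_runScan_some (l : List String) : ∀ (p : String) (run : Int),
    l.Pairwise (· ≤ ·) → (∀ x ∈ l, p ≤ x) → (run = 1 ∨ run = 2) →
    (runScan (some p) run l = true ↔
      (3 ≤ run + (l.count p : Int)) ∨ ∃ c ∈ l, c ≠ p ∧ 3 ≤ l.count c) := by
  induction l with
  | nil =>
    intro p run _ _ hrun
    simp [runScan]
    omega
  | cons k rest ih =>
    intro p run hpw hle hrun
    have hpw' : rest.Pairwise (· ≤ ·) := (List.pairwise_cons.mp hpw).2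
    have hkle : ∀ x ∈ rest, k ≤ x := (List.pairwise_cons.mp hpw).1
    by_cases hkp : k = p
    · subst hkp
      by_cases h3 : (3 : Int) ≤ run + 1
      · have : runScan (some k) run (k :: rest) = true := by
          simp [runScan, h3]
        rw [this]
        simp only [true_iff]
        left
        have : 1 ≤ (k :: rest).count k := by
          simp [List.count_cons_self]
        omega
      · have hstep : runScan (some k) run (k :: rest) = runScan (some k) (run + 1) rest := by
          simp [runScan, h3]
        rw [hstep, ih k (run + 1) hpw' hkle (by omega)]
        rw [List.count_cons_self]
        constructor
        · rintro (h | ⟨c, hc, hne, h3c⟩)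
          · left; omega
          · right
            exact ⟨c, List.mem_cons_of_mem _ hc, hne,
              by rwa [List.count_cons_of_ne (Ne.symm hne)]⟩
        · rintro (h | ⟨c, hc, hne, h3c⟩)
          · left; push_cast at h ⊢; omega
          · rcases List.mem_cons.mp hc with rfl | hc'
            · exact absurd rfl hne
            · right
              exact ⟨c, hc', hne, by rwa [List.count_cons_of_ne (Ne.symm hne)] at h3c⟩
    · have hpk : p < k := lt_of_le_of_ne (hle k (List.mem_cons_self)) (Ne.symm hkp)
      have hnp : p ∉ k :: rest := by
        intro hmem
        rcases List.mem_cons.mp hmem with rfl | h'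
        · exact absurd rfl (Ne.symm hkp)
        · exact absurd (hkle p h') (not_le.mpr hpk)
      have hcount0 : (k :: rest).count p = 0 := List.count_eq_zero.mpr hnp
      have hstep : runScan (some p) run (k :: rest) = runScan (some k) 1 rest := by
        have : (some k = some p) = False := by simp [hkp]
        simp [runScan, this]
      rw [hstep, ih k 1 hpw' hkle (Or.inl rfl)]
      rw [hcount0]
      have hallne : ∀ c ∈ k :: rest, c ≠ p := by
        intro c hc rfl; exact hnp hc
      constructor
      · rintro (h | ⟨c, hc, hne, h3c⟩)
        · right
          refine ⟨k, List.mem_cons_self, hallne k List.mem_cons_self, ?_⟩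
          rw [List.count_cons_self]
          omega
        · right
          refine ⟨c, List.mem_cons_of_mem _ hc, hallne c (List.mem_cons_of_mem _ hc), ?_⟩
          by_cases hck : c = k
          · subst hck; rw [List.count_cons_self]; omega
          · rwa [List.count_cons_of_ne (Ne.symm hck)]
      · rintro (h | ⟨c, hc, _, h3c⟩)
        · omega
        · rcases List.mem_cons.mp hc with rfl | hc'
          · left
            rw [List.count_cons_self] at h3c
            omega
          · by_cases hck : c = k
            · subst hck
              left
              rw [List.count_cons_self] at h3c
              omega
            · right
              exact ⟨c, hc', hck, by rwa [List.count_cons_of_ne (Ne.symm hck)] at h3c⟩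

theorem pv_runScan_none (l : List String) (hpw : l.Pairwise (· ≤ ·)) :
    runScan none 0 l = true ↔ ∃ c ∈ l, 3 ≤ l.count c := by
  cases l with
  | nil => simp [runScan]
  | cons k rest =>
    have hpw' : rest.Pairwise (· ≤ ·) := (List.pairwise_cons.mp hpw).2
    have hkle : ∀ x ∈ rest, k ≤ x := (List.pairwise_cons.mp hpw).1
    have hstep : runScan none 0 (k :: rest) = runScan (some k) 1 rest := by
      simp [runScan]
    rw [hstep, pv_runScan_some rest k 1 hpw' hkle (Or.inl rfl)]
    constructor
    · rintro (h | ⟨c, hc, hne, h3c⟩)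
      · exact ⟨k, List.mem_cons_self, by rw [List.count_cons_self]; omega⟩
      · exact ⟨c, List.mem_cons_of_mem _ hc, by rwa [List.count_cons_of_ne (Ne.symm hne)]⟩
    · rintro ⟨c, hc, h3c⟩
      by_cases hck : c = k
      · subst hck
        left
        rw [List.count_cons_self] at h3c
        omega
      · rcases List.mem_cons.mp hc with rfl | hc'
        · exact absurd rfl hck
        · right
          exact ⟨c, hc', hck, by rwa [List.count_cons_of_ne (Ne.symm hck)] at h3c⟩

theorem pv_B_iff (moves : List (Int × Int)) :
    col_match_alt moves = true ↔
      ∃ k ∈ moves.map (fun m => PySem.Int.toStr m.2),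
        3 ≤ (moves.map (fun m => PySem.Int.toStr m.2)).count k := by
  unfold col_match_alt
  set ks := moves.map (fun m => PySem.Int.toStr m.2) with hks
  have hperm : (PySem.List.sorted ks (fun k => k)).Perm ks :=
    PySem.List.sorted_perm ks (fun k => k) false
  have hpw : (PySem.List.sorted ks (fun k => k)).Pairwise (· ≤ ·) :=
    PySem.List.sorted_pairwise ks (fun k => k)
  rw [pv_runScan_none _ hpw]
  constructor
  · rintro ⟨c, hc, h3⟩
    exact ⟨c, hperm.mem_iff.mp hc, by rwa [hperm.count_eq] at h3⟩
  · rintro ⟨c, hc, h3⟩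
    exact ⟨c, hperm.mem_iff.mpr hc, by rwa [hperm.count_eq]⟩

-- ===== VERDICT (by name: the statement is the Claim_ definition above) =====
theorem col_match_spec : Claim_equal_col_match := by
  intro moves _
  show col_match moves = col_match_alt moves
  rw [Bool.eq_iff_iff, pv_A_iff, pv_B_iff]
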